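-- pv_equiv track=rewrite | github.com/fakeronjan/fakebasketball | generate_web.py | merger_html
-- ===== SOURCE A (Python) =====
-- def merger_html(mergers: list) -> str:
--     if not mergers:
--         return '<p style="color:var(--muted);font-style:italic">No mergers this simulation.</p>'
--     # Group by season (each wave is one merger event)
--     from collections import defaultdict
--     waves: dict[int, list] = defaultdict(list)
--     for sn, fname, is_secondary in mergers:
--         waves[sn].append((fname, is_secondary))
--     items = []
--     for sn in sorted(waves):
--         teams_in_wave = waves[sn]
--         names_html = " · ".join(
--             f'<span style="color:var(--gold2)">{fname}</span>'
--             + (f'<span style="color:var(--muted);font-size:0.73rem"> (shared mkt)</span>' if is_sec else "")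
--             for fname, is_sec in teams_in_wave
--         )
--         items.append(
--             f'<div class="reloc-item">'
--             f'<span class="sn">After S{sn}</span>'
--             f'⚡ Rival merger · {names_html}'
--             f'</div>'
--         )
--     return f'<div class="reloc-list">{"".join(items)}</div>'
-- ===== SOURCE B (Python) =====
-- def merger_html(mergers: list) -> str:
--     if not mergers:
--         return '<p style="color:var(--muted);font-style:italic">No mergers this simulation.</p>'
--     # No dict grouping: sorted set of seasons, then one filtering scan of the list per season.
--     items = [
--         f'<div class="reloc-item">'
--         f'<span class="sn">After S{sn}</span>'
--         f'⚡ Rival merger · '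
--         + " · ".join(
--             f'<span style="color:var(--gold2)">{fname}</span>'
--             + ('<span style="color:var(--muted);font-size:0.73rem"> (shared mkt)</span>' if is_sec else "")
--             for s, fname, is_sec in mergers if s == sn
--         )
--         + '</div>'
--         for sn in sorted({m[0] for m in mergers})
--     ]
--     return f'<div class="reloc-list">{"".join(items)}</div>'
-- ===== Notes on version B (the rewrite author's own statement) =====
-- stated objective: alternative
-- what changed: Drops the defaultdict grouping pass entirely: B takes the sorted set of seasons and builds each wave's names by filtering the original list per season, as a single list comprehension.
import Mathlib
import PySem

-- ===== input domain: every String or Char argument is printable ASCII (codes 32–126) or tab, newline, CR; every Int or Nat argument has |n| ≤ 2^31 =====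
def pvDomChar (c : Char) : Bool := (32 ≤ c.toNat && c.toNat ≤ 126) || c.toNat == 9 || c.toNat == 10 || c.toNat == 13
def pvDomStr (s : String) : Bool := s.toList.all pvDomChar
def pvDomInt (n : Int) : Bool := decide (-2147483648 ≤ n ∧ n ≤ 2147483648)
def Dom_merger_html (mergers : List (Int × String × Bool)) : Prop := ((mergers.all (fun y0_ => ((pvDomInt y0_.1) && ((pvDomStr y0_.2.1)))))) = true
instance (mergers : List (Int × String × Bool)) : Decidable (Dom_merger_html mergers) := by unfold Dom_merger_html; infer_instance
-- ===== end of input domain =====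

-- B drops A's defaultdict grouping: it walks the sorted set of seasons and filters the
-- original list per season, as one list comprehension (objective: alternative decomposition).

-- shared HTML literals (identical f-string fragments in both Pythons)
def mhEmpty : String := "<p style=\"color:var(--muted);font-style:italic\">No mergers this simulation.</p>"
def mhName (fname : String) (is_sec : Bool) : String :=
  "<span style=\"color:var(--gold2)\">" ++ fname ++ "</span>"
    ++ (if is_sec then "<span style=\"color:var(--muted);font-size:0.73rem\"> (shared mkt)</span>" else "")
def mhItem (sn : Int) (names_html : String) : String :=
  "<div class=\"reloc-item\"><span class=\"sn\">After S" ++ PySem.Int.toStr sn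
    ++ "</span>⚡ Rival merger · " ++ names_html ++ "</div>"
def mhWrap (body : String) : String := "<div class=\"reloc-list\">" ++ body ++ "</div>"

-- ===== PORT A =====
def merger_html (mergers : List (Int × String × Bool)) : String :=
  if mergers = [] then mhEmpty
  else
    -- waves: dict[int, list], waves[sn].append((fname, is_secondary))
    let waves : PySem.Dict Int (List (String × Bool)) :=
      mergers.foldl (fun d m => d.modify m.1 [] (· ++ [(m.2.1, m.2.2)])) PySem.Dict.empty
    let items : List String :=
      (PySem.List.sorted waves.keys (fun x => x) false).foldl (fun acc sn =>
        let teams_in_wave := waves.getD sn []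
        let names_html := PySem.Str.join " · " (teams_in_wave.map (fun p => mhName p.1 p.2))
        acc ++ [mhItem sn names_html]) []
    mhWrap (PySem.Str.join "" items)

-- ===== PORT B =====
def merger_html_alt (mergers : List (Int × String × Bool)) : String :=
  if mergers = [] then mhEmpty
  else
    let items : List String :=
      (PySem.List.sorted (PySem.Set.ofList (mergers.map (·.1))) (fun x => x) false).map
        (fun sn =>
          mhItem sn (PySem.Str.join " · "
            ((mergers.filter (fun m => m.1 == sn)).map (fun m => mhName m.2.1 m.2.2))))
    mhWrap (PySem.Str.join "" items)

-- ===== PRECONDITION & SPEC =====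
def Spec_merger_html (mergers : List (Int × String × Bool)) (out : String) : Prop := out = merger_html_alt mergers
instance (mergers : List (Int × String × Bool)) (out : String) : Decidable (Spec_merger_html mergers out) := by unfold Spec_merger_html; infer_instance

-- ===== CLAIM (what is proved, stated in full; the proofs are below) =====
def Claim_equal_merger_html : Prop := ∀ (mergers : List (Int × String × Bool)), Dom_merger_html mergers → Spec_merger_html mergers (merger_html mergers)

-- ===== LEMMAS AND PROOFS =====

theorem foldl_append_singleton {α β : Type} (f : α → β) (l : List α) (acc : List β) :
    l.foldl (fun acc x => acc ++ [f x]) acc = acc ++ l.map f := by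
  induction l generalizing acc with
  | nil => simp
  | cons x xs ih => simp [List.foldl, ih]

-- ===== VERDICT (by name: the statement is the Claim_ definition above) =====
theorem merger_html_spec : Claim_equal_merger_html := by
  intro mergers _
  unfold Spec_merger_html merger_html merger_html_alt
  by_cases h : mergers = []
  · simp [h]
  · simp only [h, ite_false]
    congr 2
    rw [foldl_append_singleton]
    have hkeys :
        (mergers.foldl (fun d m => d.modify m.1 [] (· ++ [(m.2.1, m.2.2)]))
          (PySem.Dict.empty : PySem.Dict Int (List (String × Bool)))).keys
          = PySem.Set.ofList (mergers.map (·.1)) := by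
      rw [PySem.Dict.keys_foldl_modify_key]
      simp [PySem.Set.update_nil_left, PySem.Dict.keys_empty]
    rw [hkeys]
    simp only [List.nil_append]
    apply List.map_congr_left
    intro sn _
    have hgetD :
        (mergers.foldl (fun d m => d.modify m.1 [] (· ++ [(m.2.1, m.2.2)]))
          (PySem.Dict.empty : PySem.Dict Int (List (String × Bool)))).getD sn []
          = (mergers.filter (fun m => m.1 == sn)).map (·.2) := by
      have := PySem.Dict.getD_foldl_modify_append (l := mergers)
        (d := (PySem.Dict.empty : PySem.Dict Int (List (String × Bool)))) (c := sn)
      simpa using this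
    rw [hgetD]
    simp only [List.map_map]
    rfl
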